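-- pv_equiv track=rewrite | github.com/newswimming/zettlebank | server.py | _assemble_tags
-- ===== SOURCE A (Python) =====
-- def _assemble_tags(
--     topic_tags: list[str],
--     aspect_tags: list[str],
--     affect_tags: list[str],
--     limit: int = 10,
-- ) -> list[str]:
--     """Merge all pipeline tags, dedup, cap at limit."""
--     seen: set[str] = set()
--     result: list[str] = []
--     for tag in topic_tags + aspect_tags + affect_tags:
--         if tag not in seen:
--             seen.add(tag)
--             result.append(tag)
--         if len(result) >= limit:
--             break
--     return result
-- ===== SOURCE B (Python) =====
-- def _assemble_tags(
--     topic_tags: list[str],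
--     aspect_tags: list[str],
--     affect_tags: list[str],
--     limit: int = 10,
-- ) -> list[str]:
--     """Merge all pipeline tags, dedup, cap at limit."""
--     def go(tags, acc, budget):
--         if not tags or budget <= 0:
--             return acc
--         head, rest = tags[0], tags[1:]
--         if head in acc:
--             return go(rest, acc, budget)
--         return go(rest, acc + [head], budget - 1)
--     return go(topic_tags + aspect_tags + affect_tags, [], limit)
-- ===== Notes on version B (the rewrite author's own statement) =====
-- stated objective: alternative
-- what changed: Replaces the iterative seen-set loop with post-append length check and break by a recursion that threads the accumulated result (membership tested directly on it, no separate set) and a remaining-budget counter that stops the recursion when exhausted.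
-- intended difference: When limit <= 0 and the merged tag lists are nonempty, A still returns a one-element list (it appends before checking the cap) while B returns [], which is the intended meaning of a non-positive cap. — e.g. on _assemble_tags(["a"], [], [], 0): A returns ["a"], B returns []
import Mathlib
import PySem

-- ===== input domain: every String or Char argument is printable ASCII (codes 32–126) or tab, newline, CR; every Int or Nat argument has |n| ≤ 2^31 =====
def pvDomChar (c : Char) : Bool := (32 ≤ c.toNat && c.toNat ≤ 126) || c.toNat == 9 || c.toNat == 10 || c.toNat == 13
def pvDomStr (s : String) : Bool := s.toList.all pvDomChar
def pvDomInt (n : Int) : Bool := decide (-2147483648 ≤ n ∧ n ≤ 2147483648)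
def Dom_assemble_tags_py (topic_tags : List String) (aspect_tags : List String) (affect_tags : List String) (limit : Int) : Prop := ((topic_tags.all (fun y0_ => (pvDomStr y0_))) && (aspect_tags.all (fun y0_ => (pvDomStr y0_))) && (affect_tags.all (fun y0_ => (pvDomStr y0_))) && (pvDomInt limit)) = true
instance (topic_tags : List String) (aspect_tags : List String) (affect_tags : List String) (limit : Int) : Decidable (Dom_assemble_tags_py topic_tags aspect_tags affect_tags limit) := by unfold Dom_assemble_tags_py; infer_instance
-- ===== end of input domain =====

-- B replaces A's seen-set loop (append, then length check, then break) by a recursion over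
-- the merged list carrying the accumulated result and a remaining-budget counter; on
-- limit ≤ 0 with nonempty tags A returns one element, B returns [] (stated as D_ below).

-- ===== PORT A =====
-- the for-loop of A: state (seen, result), break when len(result) >= limit after a possible append
def pvAssembleLoop (limit : Int) : List String → PySem.Set String → List String → List String
  | [], _, result => result
  | tag :: rest, seen, result =>
    let sr := if PySem.Set.contains seen tag then (seen, result)
              else (PySem.Set.add seen tag, result ++ [tag])
    if (sr.2.length : Int) ≥ limit then sr.2
    else pvAssembleLoop limit rest sr.1 sr.2

def assemble_tags_py (topic_tags : List String) (aspect_tags : List String) (affect_tags : List String) (limit : Int) : List String :=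
  pvAssembleLoop limit (topic_tags ++ aspect_tags ++ affect_tags) PySem.Set.empty []

-- ===== PORT B =====
-- B's recursive helper go(tags, acc, budget)
def pvGo : List String → List String → Int → List String
  | [], acc, _ => acc
  | head :: rest, acc, budget =>
    if budget ≤ 0 then acc
    else if acc.contains head then pvGo rest acc budget
    else pvGo rest (acc ++ [head]) (budget - 1)

def assemble_tags_py_alt (topic_tags : List String) (aspect_tags : List String) (affect_tags : List String) (limit : Int) : List String :=
  pvGo (topic_tags ++ aspect_tags ++ affect_tags) [] limit

-- ===== PRECONDITION & SPEC =====
-- When limit ≤ 0 and the merged tag lists are nonempty, A still returns a one-element list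
-- (it appends before checking the cap) while B returns [], the intended meaning of a non-positive cap.
def D_assemble_tags_py (topic_tags : List String) (aspect_tags : List String) (affect_tags : List String) (limit : Int) : Prop :=
  limit ≤ 0 ∧ topic_tags ++ aspect_tags ++ affect_tags ≠ []
instance (topic_tags : List String) (aspect_tags : List String) (affect_tags : List String) (limit : Int) : Decidable (D_assemble_tags_py topic_tags aspect_tags affect_tags limit) := by unfold D_assemble_tags_py; infer_instance

def Spec_assemble_tags_py (topic_tags : List String) (aspect_tags : List String) (affect_tags : List String) (limit : Int) (out : List String) : Prop := ¬ D_assemble_tags_py topic_tags aspect_tags affect_tags limit → out = assemble_tags_py_alt topic_tags aspect_tags affect_tags limit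
instance (topic_tags : List String) (aspect_tags : List String) (affect_tags : List String) (limit : Int) (out : List String) : Decidable (Spec_assemble_tags_py topic_tags aspect_tags affect_tags limit out) := by unfold Spec_assemble_tags_py; infer_instance

def pvDiffWitness_assemble_tags_py : List String × List String × List String × Int := (["a"], [], [], 0)
def pvDiffWitnessOut_assemble_tags_py : (List String) × (List String) := (["a"], [])

-- ===== CLAIM =====
def Claim_unchanged_assemble_tags_py : Prop := ∀ (topic_tags : List String) (aspect_tags : List String) (affect_tags : List String) (limit : Int), Dom_assemble_tags_py topic_tags aspect_tags affect_tags limit → Spec_assemble_tags_py topic_tags aspect_tags affect_tags limit (assemble_tags_py topic_tags aspect_tags affect_tags limit)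
def Claim_changed_assemble_tags_py : Prop := Dom_assemble_tags_py (pvDiffWitness_assemble_tags_py.1) (pvDiffWitness_assemble_tags_py.2.1) (pvDiffWitness_assemble_tags_py.2.2.1) (pvDiffWitness_assemble_tags_py.2.2.2) ∧ D_assemble_tags_py (pvDiffWitness_assemble_tags_py.1) (pvDiffWitness_assemble_tags_py.2.1) (pvDiffWitness_assemble_tags_py.2.2.1) (pvDiffWitness_assemble_tags_py.2.2.2) ∧ assemble_tags_py (pvDiffWitness_assemble_tags_py.1) (pvDiffWitness_assemble_tags_py.2.1) (pvDiffWitness_assemble_tags_py.2.2.1) (pvDiffWitness_assemble_tags_py.2.2.2) = pvDiffWitnessOut_assemble_tags_py.1 ∧ assemble_tags_py_alt (pvDiffWitness_assemble_tags_py.1) (pvDiffWitness_assemble_tags_py.2.1) (pvDiffWitness_assemble_tags_py.2.2.1) (pvDiffWitness_assemble_tags_py.2.2.2) = pvDiffWitnessOut_assemble_tags_py.2 ∧ pvDiffWitnessOut_assemble_tags_py.1 ≠ pvDiffWitnessOut_assemble_tags_py.2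
def Claim_exact_assemble_tags_py : Prop := ∀ (topic_tags : List String) (aspect_tags : List String) (affect_tags : List String) (limit : Int), Dom_assemble_tags_py topic_tags aspect_tags affect_tags limit → D_assemble_tags_py topic_tags aspect_tags affect_tags limit → assemble_tags_py topic_tags aspect_tags affect_tags limit ≠ assemble_tags_py_alt topic_tags aspect_tags affect_tags limit

-- ===== LEMMAS AND PROOFS =====

-- B's recursion returns the accumulator unchanged once the budget is exhausted
lemma pvGo_nonpos (tags acc : List String) (budget : Int) (h : budget ≤ 0) :
    pvGo tags acc budget = acc := by
  cases tags with
  | nil => rfl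
  | cons head rest => simp [pvGo, h]

-- correspondence of the two loop states while the budget is positive:
-- A's (seen = set(acc), result = acc, cap limit) ↔ B's (acc, budget = limit - len(acc))
lemma pvLoop_eq_go (limit : Int) (tags acc : List String) (hnd : acc.Nodup)
    (hlt : (acc.length : Int) < limit) :
    pvAssembleLoop limit tags (PySem.Set.ofList acc) acc = pvGo tags acc (limit - acc.length) := by
  induction tags generalizing acc with
  | nil => rfl
  | cons tag rest ih =>
    have hbpos : ¬ (limit - (acc.length : Int) ≤ 0) := by omega
    by_cases hmem : tag ∈ acc
    · have hc : PySem.Set.contains (PySem.Set.ofList acc) tag = true := by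
        simp [pysem, hmem]
      have hlim : ¬ ((acc.length : Int) ≥ limit) := by omega
      simp only [pvAssembleLoop, hc, if_true, if_neg hlim, pvGo, if_neg hbpos,
        List.contains_eq_mem, hmem, decide_true, if_true]
      exact ih acc hnd hlt
    · have hc : PySem.Set.contains (PySem.Set.ofList acc) tag = false := by
        simp [pysem, hmem]
      have hadd : PySem.Set.add (PySem.Set.ofList acc) tag = PySem.Set.ofList (acc ++ [tag]) :=
        (PySem.Set.ofList_append_singleton acc tag).symm
      have hnd' : (acc ++ [tag]).Nodup := by
        simp [List.nodup_append, hnd]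
        exact fun a ha h => hmem (h ▸ ha)
      simp only [pvAssembleLoop, hc, Bool.false_eq_true, if_false, List.length_append,
        List.length_singleton, pvGo, if_neg hbpos, List.contains_eq_mem, hmem, decide_false,
        Bool.false_eq_true, hadd]
      by_cases hbr : ((acc.length + 1 : Nat) : Int) ≥ limit
      · rw [if_pos hbr]
        have hb0 : limit - (acc.length : Int) - 1 ≤ 0 := by push_cast at hbr; omega
        rw [pvGo_nonpos rest (acc ++ [tag]) _ hb0]
      · rw [if_neg hbr]
        have hlt' : (((acc ++ [tag]).length : Nat) : Int) < limit := by
          simp only [List.length_append, List.length_singleton]; push_cast at hbr ⊢; omega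
        have := ih (acc ++ [tag]) hnd' hlt'
        rw [this]
        congr 1
        simp only [List.length_append, List.length_singleton]
        push_cast
        ring

-- inside D_: A returns the singleton of the first merged tag
lemma pvA_of_nonpos (limit : Int) (hle : limit ≤ 0) (tag : String) (rest : List String) :
    pvAssembleLoop limit (tag :: rest) PySem.Set.empty [] = [tag] := by
  have hc : PySem.Set.contains (PySem.Set.empty (α := String)) tag = false := rfl
  have hge : (([tag] : List String).length : Int) ≥ limit := by simp; omega
  simp only [pvAssembleLoop, hc, Bool.false_eq_true, if_false, List.nil_append, if_pos hge]

-- ===== VERDICT =====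
theorem assemble_tags_py_spec : Claim_unchanged_assemble_tags_py := by
  intro topic_tags aspect_tags affect_tags limit _ hD
  unfold assemble_tags_py assemble_tags_py_alt
  unfold D_assemble_tags_py at hD
  push Not at hD
  by_cases hpos : limit ≤ 0
  · have hnil := hD hpos
    rw [hnil]
    rfl
  · have h0 : ((List.length ([] : List String) : Nat) : Int) < limit := by
      simp only [List.length_nil, Int.natCast_zero]; omega
    have := pvLoop_eq_go limit (topic_tags ++ aspect_tags ++ affect_tags) [] List.nodup_nil h0
    simpa using this

theorem assemble_tags_py_changed : Claim_changed_assemble_tags_py := by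
  unfold Claim_changed_assemble_tags_py; decide

theorem assemble_tags_py_tight : Claim_exact_assemble_tags_py := by
  intro topic_tags aspect_tags affect_tags limit _ hD
  obtain ⟨hle, hne⟩ := hD
  unfold assemble_tags_py assemble_tags_py_alt
  obtain ⟨tag, rest, hcons⟩ := List.exists_cons_of_ne_nil hne
  rw [hcons, pvA_of_nonpos limit hle tag rest, pvGo_nonpos _ _ _ hle]
  simp
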